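-- pv_equiv track=rewrite | github.com/gylim0604/yeetcode | dailies/findScore.py | findScore1
-- ===== SOURCE A (Python) =====
-- import heapq
--
-- def findScore1(nums: list[int]) -> int:
--     score = 0
--     heap = []
--     marked = set()
--     for i in range(len(nums)):
--         heapq.heappush(heap, (nums[i],i))
--     while heap:
--         val, idx = heapq.heappop(heap)
--         if not idx in marked:
--             score+= val
--             marked.add(idx+1)
--             marked.add(idx-1)
--     return score
-- ===== SOURCE B (Python) =====
-- def findScore1(nums: list[int]) -> int:
--     # Right-to-left dynamic programming over suffixes: no heap, no sort, no marked set.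
--     # For each suffix we keep (score, head_taken) under two scenarios: the element just left
--     # of the suffix does / does not block the suffix head.
--     st = None  # None = empty suffix; else (head_value, (score_blocked, taken_blocked), (score_free, taken_free))
--     for x in reversed(nums):
--         if st is None:
--             st = (x, (0, False), (x, True))
--         else:
--             y, (sb, tb), (sf, tf) = st
--             if y < x:
--                 # head of old suffix is processed before x; x is taken iff free and y's index untaken
--                 t = not tf
--                 st = (x, (sf, False), ((x if t else 0) + sf, t))
--             else:
--                 # x processed before y; if x is taken it blocks y
--                 st = (x, (sf, False), (x + sb, True))
--     return 0 if st is None else st[2][0]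
-- ===== Notes on version B (the rewrite author's own statement) =====
-- stated objective: faster
-- what changed: Replaces the heapq priority queue and marked set with a single right-to-left linear DP over suffixes that keeps, for each suffix, the score and whether its head is taken under the two scenarios 'blocked/not blocked from the left'.
import Mathlib
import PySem

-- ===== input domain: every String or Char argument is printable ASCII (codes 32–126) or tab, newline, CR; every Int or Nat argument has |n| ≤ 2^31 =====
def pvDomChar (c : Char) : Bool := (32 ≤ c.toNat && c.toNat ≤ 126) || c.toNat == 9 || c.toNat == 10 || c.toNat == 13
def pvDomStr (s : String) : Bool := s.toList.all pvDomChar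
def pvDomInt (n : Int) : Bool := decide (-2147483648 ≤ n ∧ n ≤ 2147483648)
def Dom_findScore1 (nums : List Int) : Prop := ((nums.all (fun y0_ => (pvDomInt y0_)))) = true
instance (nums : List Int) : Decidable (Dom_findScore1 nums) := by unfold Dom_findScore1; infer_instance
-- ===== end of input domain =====

-- B replaces A's heapq priority queue + marked set with a single right-to-left linear DP over
-- suffixes (for each suffix: score and head-taken flag under 'blocked / not blocked from the left');
-- measurably faster (O(n) instead of O(n log n)).

-- ===== PORT A =====
-- heapq on tuples is ported by its contract: the heap is kept as a list sorted by Python's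
-- lexicographic tuple order (heappush = ordered insert, heappop = take the head = the minimum);
-- this is value-exact: heappop always returns the lexicographically smallest tuple in the heap.
def pvLexLt (a b : Int × Int) : Bool :=
  decide (a.1 < b.1) || (!decide (b.1 < a.1) && decide (a.2 < b.2))

def pvHeapPush (heap : List (Int × Int)) (x : Int × Int) : List (Int × Int) :=
  PySem.List.insertBy pvLexLt x heap

-- the 'while heap:' pop loop of A
def pvPopLoop : List (Int × Int) → Int → PySem.Set Int → Int
  | [], score, _ => score
  | (val, idx) :: rest, score, marked =>
      if PySem.Set.contains marked idx then pvPopLoop rest score marked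
      else pvPopLoop rest (score + val) (PySem.Set.add (PySem.Set.add marked (idx + 1)) (idx - 1))

def findScore1 (nums : List Int) : Int :=
  let heap := (PySem.List.pyRange 0 nums.length 1).foldl
      (fun h i => pvHeapPush h (PySem.List.pyGetD nums i 0, i)) []
  pvPopLoop heap 0 PySem.Set.empty

-- ===== PORT B =====
-- one step of B's right-to-left DP; state: none = empty suffix, else
-- (head value, (score, head taken) if blocked from the left, (score, head taken) if not blocked)
def pvDpStep (x : Int) (st : Option (Int × (Int × Bool) × (Int × Bool))) :
    Option (Int × (Int × Bool) × (Int × Bool)) :=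
  match st with
  | none => some (x, (0, false), (x, true))
  | some (y, (sb, _tb), (sf, tf)) =>
      if y < x then
        some (x, (sf, false), ((if !tf then x else 0) + sf, !tf))
      else
        some (x, (sf, false), (x + sb, true))

def findScore1_alt (nums : List Int) : Int :=
  match nums.reverse.foldl (fun st x => pvDpStep x st) none with
  | none => 0
  | some (_, _, (sf, _)) => sf

-- ===== PRECONDITION & SPEC =====
def Spec_findScore1 (nums : List Int) (out : Int) : Prop := out = findScore1_alt nums
instance (nums : List Int) (out : Int) : Decidable (Spec_findScore1 nums out) := by unfold Spec_findScore1; infer_instance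

-- ===== CLAIM (what is proved, stated in full; the proofs are below) =====
def Claim_equal_findScore1 : Prop := ∀ (nums : List Int), Dom_findScore1 nums → Spec_findScore1 nums (findScore1 nums)

-- ===== LEMMAS AND PROOFS =====

-- value at an index, and the (value, index) lexicographic key the heap orders by
def pvVal (nums : List Int) (i : Int) : Int := PySem.List.pyGetD nums i 0
def pvKey (nums : List Int) (i : Int) : Int ×ₗ Int := toLex (pvVal nums i, i)

-- A's pop loop fold, on the index level (score, marked)
def pvScoreFold (nums : List Int) (l : List Int) (st : Int × PySem.Set Int) : Int × PySem.Set Int :=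
  l.foldl
    (fun (st : Int × PySem.Set Int) i =>
      if PySem.Set.contains st.2 i then st
      else (st.1 + pvVal nums i, PySem.Set.add (PySem.Set.add st.2 (i + 1)) (i - 1)))
    st

-- same fold, instrumented to record the taken indices instead of the score
def pvFoldT (l : List Int) (st : List Int × PySem.Set Int) : List Int × PySem.Set Int :=
  l.foldl
    (fun (st : List Int × PySem.Set Int) i =>
      if PySem.Set.contains st.2 i then st
      else (st.1 ++ [i], PySem.Set.add (PySem.Set.add st.2 (i + 1)) (i - 1)))
    st

-- the sorted processing order of A's heap
def pvSigma (nums : List Int) : List Int :=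
  PySem.List.sorted (PySem.List.pyRange 0 nums.length 1) (pvKey nums) false

-- the set of indices A actually takes
def pvTfin (nums : List Int) : List Int :=
  (pvFoldT (pvSigma nums) ([], PySem.Set.empty)).1

def pvTk (nums : List Int) (i : Int) : Bool := decide (i ∈ pvTfin nums)

-- sum of taken values over the index suffix [k, n)
def pvSufSum (nums : List Int) (k : Int) : Int :=
  ((PySem.List.pyRange k nums.length 1).map
    (fun j => if pvTk nums j then pvVal nums j else 0)).sum

-- "index k is blocked from the left": its left neighbour is taken and pops earlier
def pvBl (nums : List Int) (k : Int) : Bool :=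
  pvTk nums (k - 1) && decide (pvVal nums (k - 1) ≤ pvVal nums k)

-- ---- A-side: heap = sorted index order, pop loop = index fold ----

theorem pv_insertBy_map (nums : List Int) (i : Int) (l : List Int) :
    pvHeapPush (l.map (fun j => (pvVal nums j, j))) (pvVal nums i, i)
    = (PySem.List.insertBy (fun a b => decide (pvKey nums a < pvKey nums b)) i l).map
        (fun j => (pvVal nums j, j)) := by
  have hpt : ∀ a b : Int, pvLexLt (pvVal nums a, a) (pvVal nums b, b)
      = decide (pvKey nums a < pvKey nums b) := by
    intro a b
    simp only [pvLexLt, pvKey, Prod.Lex.toLex_lt_toLex]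
    by_cases h1 : pvVal nums a < pvVal nums b <;> by_cases h2 : pvVal nums b < pvVal nums a <;>
      by_cases h3 : a < b <;> simp [h1, h2, h3] <;> omega
  induction l with
  | nil => rfl
  | cons y ys ih =>
      simp only [List.map_cons, pvHeapPush, PySem.List.insertBy] at *
      rw [hpt]
      by_cases h : (decide (pvKey nums i < pvKey nums y)) = true
      · simp [h]
      · simp only [h]; simp [ih]

theorem pv_heap_eq_map (nums : List Int) (is : List Int) (acc : List Int) :
    is.foldl (fun h i => pvHeapPush h (pvVal nums i, i))
      (acc.map (fun j => (pvVal nums j, j)))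
    = (is.foldl (fun o i => PySem.List.insertBy
        (fun a b => decide (pvKey nums a < pvKey nums b)) i o) acc).map
        (fun j => (pvVal nums j, j)) := by
  induction is generalizing acc with
  | nil => rfl
  | cons i rest ih => rw [List.foldl_cons, List.foldl_cons, pv_insertBy_map, ih]

theorem pv_heap_eq_sigma (nums : List Int) :
    (PySem.List.pyRange 0 nums.length 1).foldl
      (fun h i => pvHeapPush h (pvVal nums i, i)) []
    = (pvSigma nums).map (fun j => (pvVal nums j, j)) := by
  rw [pvSigma, PySem.List.sorted_eq_foldl_insertBy]
  exact pv_heap_eq_map nums (PySem.List.pyRange 0 nums.length 1) []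

theorem pv_pop_eq_fold (nums : List Int) (l : List Int) (s : Int) (m : PySem.Set Int) :
    pvPopLoop (l.map (fun j => (pvVal nums j, j))) s m
    = (pvScoreFold nums l (s, m)).1 := by
  induction l generalizing s m with
  | nil => rfl
  | cons i rest ih =>
      simp only [pvScoreFold] at ih ⊢
      simp only [List.map_cons, pvPopLoop, List.foldl_cons]
      cases h : PySem.Set.contains m i with
      | true => rw [if_pos rfl, if_pos rfl]; exact ih s m
      | false =>
          rw [if_neg (by simp), if_neg (by simp)]
          exact ih _ _

-- score fold = sum over the instrumented taken list
theorem pv_foldT_prefix (l : List Int) (T : List Int) (m : PySem.Set Int) :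
    (pvFoldT l (T, m)).1 = T ++ (pvFoldT l ([], m)).1 := by
  induction l generalizing T m with
  | nil => simp [pvFoldT]
  | cons i rest ih =>
      simp only [pvFoldT, List.foldl_cons] at ih ⊢
      cases h : PySem.Set.contains m i with
      | true => rw [if_pos rfl, if_pos rfl]; exact ih T m
      | false =>
          rw [if_neg (by simp), if_neg (by simp)]
          simp only [List.nil_append]
          rw [ih (T ++ [i]), ih [i]]
          simp

theorem pv_score_eq_sum (nums : List Int) (l : List Int) (s : Int) (m : PySem.Set Int) :
    (pvScoreFold nums l (s, m)).1
    = s + (((pvFoldT l ([], m)).1).map (pvVal nums)).sum := by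
  induction l generalizing s m with
  | nil => simp [pvScoreFold, pvFoldT]
  | cons i rest ih =>
      simp only [pvScoreFold, pvFoldT, List.foldl_cons] at ih ⊢
      cases h : PySem.Set.contains m i with
      | true => rw [if_pos rfl, if_pos rfl]; exact ih s m
      | false =>
          rw [if_neg (by simp), if_neg (by simp)]
          simp only [List.nil_append]
          rw [ih]
          have hpref := pv_foldT_prefix rest [i] (PySem.Set.add (PySem.Set.add m (i + 1)) (i - 1))
          simp only [pvFoldT] at hpref
          rw [hpref]
          simp
          ring

-- ---- the characterisation of the taken set ----

theorem pv_char (nums : List Int) :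
    ∀ (l T : List Int) (m : PySem.Set Int),
    (∀ x : Int, PySem.Set.contains m x = true ↔ ∃ t ∈ T, x = t + 1 ∨ x = t - 1) →
    (∀ i ∈ l, ∀ t ∈ T, pvKey nums t < pvKey nums i) →
    l.Pairwise (fun a b => pvKey nums a < pvKey nums b) →
    T.Nodup →
    (∀ t ∈ (pvFoldT l (T, m)).1, t ∈ T ∨ t ∈ l) ∧
    (∀ t ∈ T, t ∈ (pvFoldT l (T, m)).1) ∧
    ((pvFoldT l (T, m)).1).Nodup ∧
    (∀ i ∈ l, (i ∈ (pvFoldT l (T, m)).1 ↔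
      ((i - 1 ∈ (pvFoldT l (T, m)).1 → ¬ pvKey nums (i - 1) < pvKey nums i) ∧
       (i + 1 ∈ (pvFoldT l (T, m)).1 → ¬ pvKey nums (i + 1) < pvKey nums i)))) := by
  intro l
  induction l with
  | nil =>
      intro T m _ _ _ hnd
      refine ⟨fun t ht => Or.inl ht, fun t ht => ht, hnd, fun i hi => absurd hi (by simp)⟩
  | cons i rest ih =>
      intro T m Hm Hlt Hp hnd
      have hpair := (List.pairwise_cons.1 Hp)
      have hirest : ∀ j ∈ rest, pvKey nums i < pvKey nums j := hpair.1
      have hprest : rest.Pairwise (fun a b => pvKey nums a < pvKey nums b) := hpair.2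
      by_cases hc : PySem.Set.contains m i = true
      · -- i is skipped
        have hc' : i ∈ m := by simpa using hc
        have hstep : pvFoldT (i :: rest) (T, m) = pvFoldT rest (T, m) := by
          simp [pvFoldT, hc']
        obtain ⟨t, htT, hti⟩ := (Hm i).1 hc
        have hblk : (t = i - 1 ∨ t = i + 1) := by omega
        obtain ⟨hA, hB, hC, hD⟩ := ih T m Hm
          (fun j hj t' ht' => Hlt j (List.mem_cons_of_mem _ hj) t' ht') hprest hnd
        rw [hstep]
        refine ⟨fun t' ht' => (hA t' ht').imp id (List.mem_cons_of_mem _), hB, hC, ?_⟩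
        intro j hj
        rcases List.mem_cons.1 hj with rfl | hj'
        · -- j = i : skipped, and the right-hand side is false
          have hiT : j ∉ (pvFoldT rest (T, m)).1 := by
            intro hmem
            rcases hA j hmem with h1 | h1
            · exact absurd (Hlt j (List.mem_cons_self) j h1) (lt_irrefl _)
            · exact absurd (hirest j h1) (lt_irrefl _)
          constructor
          · intro h; exact absurd h hiT
          · rintro ⟨h1, h2⟩
            have htlt : pvKey nums t < pvKey nums j := Hlt j (List.mem_cons_self) t htT
            have htmem : t ∈ (pvFoldT rest (T, m)).1 := hB t htT
            rcases hblk with rfl | rfl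
            · exact absurd htlt (h1 htmem)
            · exact absurd htlt (h2 htmem)
        · exact hD j hj'
      · -- i is taken
        have hstep : pvFoldT (i :: rest) (T, m)
            = pvFoldT rest (T ++ [i], PySem.Set.add (PySem.Set.add m (i + 1)) (i - 1)) := by
          have hc' : i ∉ m := by simpa using hc
          simp [pvFoldT, hc']
        have Hm2 : ∀ x : Int,
            PySem.Set.contains (PySem.Set.add (PySem.Set.add m (i + 1)) (i - 1)) x = true ↔
            ∃ t ∈ T ++ [i], x = t + 1 ∨ x = t - 1 := by
          intro x
          rw [PySem.Set.contains_iff, PySem.Set.mem_add, PySem.Set.mem_add,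
            ← PySem.Set.contains_iff (s := m), Hm]
          constructor
          · rintro ((⟨t, ht, h⟩ | rfl) | rfl)
            · exact ⟨t, by simp [ht], h⟩
            · exact ⟨i, by simp, Or.inl rfl⟩
            · exact ⟨i, by simp, Or.inr rfl⟩
          · rintro ⟨t, ht, h⟩
            rcases List.mem_append.1 ht with ht' | ht'
            · exact Or.inl (Or.inl ⟨t, ht', h⟩)
            · have : t = i := by simpa using ht'
              subst this
              rcases h with rfl | rfl
              · exact Or.inl (Or.inr rfl)
              · exact Or.inr rfl
        have Hlt2 : ∀ j ∈ rest, ∀ t ∈ T ++ [i], pvKey nums t < pvKey nums j := by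
          intro j hj t ht
          rcases List.mem_append.1 ht with ht' | ht'
          · exact Hlt j (List.mem_cons_of_mem _ hj) t ht'
          · have : t = i := by simpa using ht'
            subst this; exact hirest j hj
        have hiT : i ∉ T := by
          intro h
          exact absurd (Hlt i (List.mem_cons_self) i h) (lt_irrefl _)
        have hnd2 : (T ++ [i]).Nodup := by
          simp [List.nodup_append, hnd]
          intro a ha h
          subst h
          exact hiT ha
        obtain ⟨hA, hB, hC, hD⟩ := ih (T ++ [i]) _ Hm2 Hlt2 hprest hnd2
        rw [hstep]
        have hiMem : i ∈ (pvFoldT rest (T ++ [i], _)).1 := hB i (by simp)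
        refine ⟨?_, fun t ht => hB t (by simp [ht]), hC, ?_⟩
        · intro t' ht'
          rcases hA t' ht' with h1 | h1
          · rcases List.mem_append.1 h1 with h2 | h2
            · exact Or.inl h2
            · exact Or.inr (List.mem_cons.2 (Or.inl (by simpa using h2)))
          · exact Or.inr (List.mem_cons_of_mem _ h1)
        · intro j hj
          rcases List.mem_cons.1 hj with rfl | hj'
          · -- j = i : taken, and no earlier-popping neighbour is in the final set
            constructor
            · intro _
              constructor
              · intro hmem hklt
                rcases hA _ hmem with h1 | h1
                · rcases List.mem_append.1 h1 with h2 | h2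
                  · -- a T-member neighbour would have marked i
                    exact hc ((Hm j).2 ⟨j - 1, h2, by omega⟩)
                  · simp at h2
                · exact absurd (hirest _ h1) (not_lt_of_gt hklt)
              · intro hmem hklt
                rcases hA _ hmem with h1 | h1
                · rcases List.mem_append.1 h1 with h2 | h2
                  · exact hc ((Hm j).2 ⟨j + 1, h2, by omega⟩)
                  · simp at h2
                · exact absurd (hirest _ h1) (not_lt_of_gt hklt)
            · intro _; exact hiMem
          · exact hD j hj'

-- ---- facts about the sorted order σ ----

theorem pv_key_inj (nums : List Int) : Function.Injective (pvKey nums) := by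
  intro a b h
  have := congrArg (fun p => (ofLex p).2) h
  simpa [pvKey] using this

theorem pv_sigma_perm (nums : List Int) :
    (pvSigma nums).Perm (PySem.List.pyRange 0 nums.length 1) :=
  PySem.List.sorted_perm _ _ _

theorem pv_mem_sigma (nums : List Int) (i : Int) :
    i ∈ pvSigma nums ↔ 0 ≤ i ∧ i < nums.length := by
  rw [pvSigma, PySem.List.mem_sorted, PySem.List.mem_pyRange_one]

theorem pv_sigma_nodup (nums : List Int) : (pvSigma nums).Nodup :=
  (pv_sigma_perm nums).nodup_iff.2 (PySem.List.nodup_pyRange_one 0 nums.length)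

theorem pv_sigma_pairwise (nums : List Int) :
    (pvSigma nums).Pairwise (fun a b => pvKey nums a < pvKey nums b) := by
  have h1 : (pvSigma nums).Pairwise (fun a b => pvKey nums a ≤ pvKey nums b) :=
    PySem.List.sorted_pairwise _ _
  have h2 : (pvSigma nums).Pairwise (fun a b : Int => a ≠ b) := pv_sigma_nodup nums
  exact (h1.and h2).imp (fun {a b} h =>
    lt_of_le_of_ne h.1 (fun hk => h.2 (pv_key_inj nums hk)))

-- the characterisation, instantiated at σ
theorem pv_Tfin_props (nums : List Int) :
    (∀ t ∈ pvTfin nums, 0 ≤ t ∧ t < nums.length) ∧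
    (pvTfin nums).Nodup ∧
    (∀ i : Int, 0 ≤ i → i < nums.length →
      (i ∈ pvTfin nums ↔
        ((i - 1 ∈ pvTfin nums → ¬ pvKey nums (i - 1) < pvKey nums i) ∧
         (i + 1 ∈ pvTfin nums → ¬ pvKey nums (i + 1) < pvKey nums i)))) := by
  have Hm : ∀ x : Int, PySem.Set.contains (PySem.Set.empty : PySem.Set Int) x = true ↔
      ∃ t ∈ ([] : List Int), x = t + 1 ∨ x = t - 1 := by
    intro x; simp [PySem.Set.empty]
  obtain ⟨hA, _, hC, hD⟩ := pv_char nums (pvSigma nums) [] PySem.Set.empty Hm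
    (by intro i _ t ht; simp at ht) (pv_sigma_pairwise nums) (by simp)
  refine ⟨?_, hC, ?_⟩
  · intro t ht
    rcases hA t ht with h | h
    · simp at h
    · exact (pv_mem_sigma nums t).1 h
  · intro i h0 h1
    exact hD i ((pv_mem_sigma nums i).2 ⟨h0, h1⟩)

-- neighbour key comparisons reduce to value comparisons
theorem pv_keyLt_left (nums : List Int) (k : Int) :
    pvKey nums (k - 1) < pvKey nums k ↔ pvVal nums (k - 1) ≤ pvVal nums k := by
  simp only [pvKey, Prod.Lex.toLex_lt_toLex]
  constructor
  · rintro (h | ⟨h1, _⟩) <;> omega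
  · intro h
    rcases lt_or_eq_of_le h with h' | h'
    · exact Or.inl h'
    · exact Or.inr ⟨h', by omega⟩

theorem pv_keyLt_right (nums : List Int) (k : Int) :
    pvKey nums (k + 1) < pvKey nums k ↔ pvVal nums (k + 1) < pvVal nums k := by
  simp only [pvKey, Prod.Lex.toLex_lt_toLex]
  constructor
  · rintro (h | ⟨h1, h2⟩)
    · exact h
    · omega
  · exact Or.inl

theorem pv_tk_range (nums : List Int) (j : Int) (h : pvTk nums j = true) :
    0 ≤ j ∧ j < nums.length :=
  (pv_Tfin_props nums).1 j (of_decide_eq_true h)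

-- the local equation E(k): k is taken iff no earlier-popping neighbour is taken
theorem pv_E (nums : List Int) (k : Int) (h0 : 0 ≤ k) (h1 : k < nums.length) :
    pvTk nums k
    = (!(pvTk nums (k - 1) && decide (pvVal nums (k - 1) ≤ pvVal nums k)) &&
       !(pvTk nums (k + 1) && decide (pvVal nums (k + 1) < pvVal nums k))) := by
  have hE := ((pv_Tfin_props nums).2.2 k h0 h1)
  rw [pv_keyLt_left, pv_keyLt_right] at hE
  by_cases hk : k ∈ pvTfin nums
  · have h2 := hE.1 hk
    simp only [pvTk, hk, decide_true]
    rcases h2 with ⟨ha, hb⟩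
    by_cases hm1 : k - 1 ∈ pvTfin nums <;> by_cases hp1 : k + 1 ∈ pvTfin nums <;>
      simp [*]
  · have h2 : ¬ ((k - 1 ∈ pvTfin nums → ¬ pvVal nums (k - 1) ≤ pvVal nums k) ∧
        (k + 1 ∈ pvTfin nums → ¬ pvVal nums (k + 1) < pvVal nums k)) := fun h => hk (hE.2 h)
    simp only [pvTk, hk, decide_false]
    rw [not_and_or] at h2
    rcases h2 with h2 | h2 <;> rw [Classical.not_imp, not_not] at h2 <;>
      simp [h2.1, h2.2]

-- ---- A's value = the suffix sum from 0 ----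

theorem pv_sum_filter (l : List Int) (p : Int → Bool) (f : Int → Int) :
    (l.map (fun k => if p k then f k else 0)).sum = ((l.filter p).map f).sum := by
  induction l with
  | nil => rfl
  | cons x xs ih =>
      by_cases h : p x = true <;> simp [h, ih]

theorem pv_A_eq_sufSum (nums : List Int) : findScore1 nums = pvSufSum nums 0 := by
  have h1 : findScore1 nums = (pvScoreFold nums (pvSigma nums) (0, PySem.Set.empty)).1 := by
    show pvPopLoop ((PySem.List.pyRange 0 nums.length 1).foldl
      (fun h i => pvHeapPush h (PySem.List.pyGetD nums i 0, i)) []) 0 PySem.Set.empty = _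
    rw [show (fun (h : List (Int × Int)) (i : Int) => pvHeapPush h (PySem.List.pyGetD nums i 0, i))
        = fun h i => pvHeapPush h (pvVal nums i, i) from rfl]
    rw [pv_heap_eq_sigma, pv_pop_eq_fold]
  rw [h1, pv_score_eq_sum]
  have hperm : (pvTfin nums).Perm ((PySem.List.pyRange 0 nums.length 1).filter
      (fun k => pvTk nums k)) := by
    apply (List.perm_ext_iff_of_nodup (pv_Tfin_props nums).2.1
      ((PySem.List.nodup_pyRange_one 0 nums.length).filter _)).2
    intro a
    simp only [List.mem_filter, PySem.List.mem_pyRange_one, pvTk, decide_eq_true_eq]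
    constructor
    · intro h; exact ⟨(pv_Tfin_props nums).1 a h, h⟩
    · exact fun h => h.2
  rw [pvSufSum, pv_sum_filter]
  have := hperm.map (pvVal nums)
  rw [show (pvFoldT (pvSigma nums) ([], PySem.Set.empty)).1 = pvTfin nums from rfl,
    this.sum_eq]
  ring

-- ---- B-side: the DP computes the suffix sums ----

theorem pv_val_at (nums : List Int) (k : Nat) (h : k < nums.length) :
    pvVal nums (k : Int) = nums[k] := by
  simp [pvVal, PySem.List.pyGetD_natCast, List.getD_eq_getElem?_getD, List.getElem?_eq_getElem h]

theorem pv_sufSum_cons (nums : List Int) (k : Int) (h : k < nums.length) :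
    pvSufSum nums k = (if pvTk nums k then pvVal nums k else 0) + pvSufSum nums (k + 1) := by
  rw [pvSufSum, PySem.List.pyRange_one_cons h]
  simp [pvSufSum]

theorem pv_sufSum_last (nums : List Int) :
    pvSufSum nums (nums.length : Int) = 0 := by
  rw [pvSufSum, PySem.List.pyRange_one_eq_nil (by omega)]
  rfl

theorem pv_tk_out (nums : List Int) (j : Int) (h : ¬ (0 ≤ j ∧ j < nums.length)) :
    pvTk nums j = false := by
  by_cases hj : pvTk nums j = true
  · exact absurd (pv_tk_range nums j hj) h
  · simpa using hj

-- main DP invariant, by downward induction on the suffix start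
theorem pv_dp (nums : List Int) :
    ∀ (d k : Nat), nums.length - k ≤ d → k < nums.length →
    ∃ p : Int × (Int × Bool) × (Int × Bool),
      (nums.drop k).foldr pvDpStep none = some p ∧
      p.1 = pvVal nums (k : Int) ∧
      (pvBl nums k = true → p.2.1.1 = pvSufSum nums k ∧ p.2.1.2 = pvTk nums k) ∧
      (pvBl nums k = false → p.2.2.1 = pvSufSum nums k ∧ p.2.2.2 = pvTk nums k) := by
  intro d
  induction d with
  | zero => intro k h hk; omega
  | succ d ih =>
      intro k h hk
      have hdrop : nums.drop k = nums[k] :: nums.drop (k + 1) := List.drop_eq_getElem_cons hk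
      have hx : nums[k] = pvVal nums (k : Int) := (pv_val_at nums k hk).symm
      have hE := pv_E nums (k : Int) (by omega) (by exact_mod_cast hk)
      have hsum := pv_sufSum_cons nums (k : Int) (by exact_mod_cast hk)
      by_cases hlast : k + 1 < nums.length
      · -- inner step: the suffix k+1 is nonempty
        obtain ⟨p', hfold', hy, hBlk', hFree'⟩ := ih (k + 1) (by omega) hlast
        obtain ⟨y, ⟨sb, tb⟩, sf, tf⟩ := p'
        simp only at hy hBlk' hFree'
        have hcast : ((k + 1 : Nat) : Int) = (k : Int) + 1 := by omega
        rw [hcast] at hy hBlk' hFree'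
        have hblk1 : pvBl nums ((k : Int) + 1)
            = (pvTk nums k && decide (pvVal nums (k : Int) ≤ pvVal nums ((k : Int) + 1))) := by
          simp [pvBl, add_sub_cancel_right]
        rw [hdrop, List.foldr_cons, hfold', hx]
        by_cases hyx : y < pvVal nums (k : Int)
        · -- nums[k+1] < nums[k]: the right neighbour pops first
          have hvy : pvVal nums ((k : Int) + 1) < pvVal nums (k : Int) := hy ▸ hyx
          have hble : ¬ pvVal nums (k : Int) ≤ pvVal nums ((k : Int) + 1) := by omega
          have hbl1 : pvBl nums ((k : Int) + 1) = false := by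
            rw [hblk1]; simp [hble]
          obtain ⟨hsf, htf⟩ := hFree' hbl1
          simp only [pvDpStep]
          rw [if_pos hyx]
          have htkk : pvTk nums (k : Int) = (!pvBl nums (k : Int) && !tf) := by
            rw [hE]
            have hdec : decide (pvVal nums ((k : Int) + 1) < pvVal nums (k : Int)) = true := by
              simpa using hvy
            simp [pvBl, hdec, htf]
          refine ⟨_, rfl, rfl, ?_, ?_⟩
          · intro hbl
            constructor
            · simp only
              rw [hsum, show pvTk nums (k : Int) = false by rw [htkk, hbl]; simp, hsf]
              simp
            · simp only
              rw [htkk, hbl]; simp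
          · intro hbl
            have : pvTk nums (k : Int) = !tf := by rw [htkk, hbl]; simp
            constructor
            · simp only
              rw [hsum, this, hsf]
            · simpa using this.symm
        · -- nums[k] <= nums[k+1]: k pops before its right neighbour
          have hvy : pvVal nums (k : Int) ≤ pvVal nums ((k : Int) + 1) := by
            rw [← hy]; omega
          have hnoR : (pvTk nums ((k : Int) + 1) &&
              decide (pvVal nums ((k : Int) + 1) < pvVal nums (k : Int))) = false := by
            have : ¬ pvVal nums ((k : Int) + 1) < pvVal nums (k : Int) := by omega
            simp [this]
          have htkk : pvTk nums (k : Int) = !pvBl nums (k : Int) := by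
            rw [hE, hnoR]
            simp [pvBl]
          simp only [pvDpStep]
          rw [if_neg hyx]
          refine ⟨_, rfl, rfl, ?_, ?_⟩
          · intro hbl
            have htk : pvTk nums (k : Int) = false := by rw [htkk, hbl]; simp
            have hbl1 : pvBl nums ((k : Int) + 1) = false := by rw [hblk1, htk]; simp
            obtain ⟨hsf, _⟩ := hFree' hbl1
            constructor
            · simp only; rw [hsum, htk, hsf]; simp
            · simp only; rw [htk]
          · intro hbl
            have htk : pvTk nums (k : Int) = true := by rw [htkk, hbl]; simp
            have hbl1 : pvBl nums ((k : Int) + 1) = true := by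
              rw [hblk1, htk]; simp [hvy]
            obtain ⟨hsb, _⟩ := hBlk' hbl1
            constructor
            · simp only; rw [hsum, htk, hsb]; simp
            · simp only; rw [htk]
      · -- k is the last index
        have hk1 : k + 1 = nums.length := by omega
        have hdrop1 : nums.drop (k + 1) = [] := by
          apply List.drop_eq_nil_of_le; omega
        rw [hdrop, hdrop1, List.foldr_cons, List.foldr_nil, hx]
        have htkN : pvTk nums ((k : Int) + 1) = false :=
          pv_tk_out nums ((k : Int) + 1) (by omega)
        have htkk : pvTk nums (k : Int) = !pvBl nums (k : Int) := by
          rw [hE, htkN]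
          simp [pvBl]
        have hsum0 : pvSufSum nums ((k : Int) + 1) = 0 := by
          have : ((k : Int) + 1) = (nums.length : Int) := by omega
          rw [this, pv_sufSum_last]
        refine ⟨_, rfl, rfl, ?_, ?_⟩
        · intro hbl
          have htk : pvTk nums (k : Int) = false := by rw [htkk, hbl]; simp
          constructor
          · simp only; rw [hsum, htk, hsum0]; simp
          · simp only; rw [htk]
        · intro hbl
          have htk : pvTk nums (k : Int) = true := by rw [htkk, hbl]; simp
          constructor
          · simp only; rw [hsum, htk, hsum0]; simp
          · simp only; rw [htk]

-- ===== VERDICT (by name: the statement is the Claim_ definition above) =====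
theorem findScore1_spec : Claim_equal_findScore1 := by
  intro nums _
  show findScore1 nums = findScore1_alt nums
  rw [pv_A_eq_sufSum]
  rw [findScore1_alt, List.foldl_reverse]
  by_cases hn : nums.length = 0
  · rw [List.eq_nil_of_length_eq_zero hn]
    rfl
  · have h0 : (0 : Nat) < nums.length := by omega
    obtain ⟨p, hfold, _, _, hFree⟩ := pv_dp nums nums.length 0 (by omega) h0
    have hdrop0 : nums.drop 0 = nums := List.drop_zero
    rw [hdrop0] at hfold
    have hbl0 : pvBl nums 0 = false := by
      have h1 : pvTk nums (-1 : Int) = false := pv_tk_out nums (-1) (by omega)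
      simp [pvBl, h1]
    obtain ⟨hsf, _⟩ := hFree hbl0
    obtain ⟨y, ⟨sb, tb⟩, sf, tf⟩ := p
    rw [show nums.foldr (fun x y => pvDpStep x y) none
      = some (y, (sb, tb), (sf, tf)) from hfold]
    simp only at hsf
    simpa using hsf.symm
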